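-- pv_equiv track=rewrite | github.com/josh-flori/videobot | memes/text.py | add_period
-- ===== SOURCE A (Python) =====
-- def add_period(p_text):
--     """ The purpose of this function is to add periods for proper audio spacing, so for instance given this
--     paragraph: '"A degree in art is useless"\nMe as an art major:\n', we would want to add a period after the word
--     useless so the audio module creates natural sounding speech. The idea is to create pauses where needed."""
--     quote_count = 0
--     p_text_output = ''
--     for i in range(len(p_text)):
--         if p_text[i] != '"':
--             p_text_output += p_text[i]
--         elif p_text[i] == '"' and quote_count == 0:
--             p_text_output += p_text[i]
--             quote_count += 1
--         elif p_text[i] == '"' and quote_count == 1: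
--             p_text_output += '.'
--             p_text_output += p_text[i]
--             quote_count = 0
--     return p_text_output
-- ===== SOURCE B (Python) =====
-- def add_period(p_text):
--     """Add a '.' before every second (closing) double quote."""
--     segs = p_text.split('"')
--     out = [segs[0]]
--     for k in range(1, len(segs)):
--         if k % 2 == 0:
--             out.append('.')
--         out.append('"')
--         out.append(segs[k])
--     return ''.join(out)
-- ===== Notes on version B (the rewrite author's own statement) =====
-- stated objective: simpler
-- what changed: B splits the text on the double-quote character and rejoins the segments, inserting a period before every even-numbered quote boundary, instead of A's character-by-character scan with an explicit parity counter.
import Mathlib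
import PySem

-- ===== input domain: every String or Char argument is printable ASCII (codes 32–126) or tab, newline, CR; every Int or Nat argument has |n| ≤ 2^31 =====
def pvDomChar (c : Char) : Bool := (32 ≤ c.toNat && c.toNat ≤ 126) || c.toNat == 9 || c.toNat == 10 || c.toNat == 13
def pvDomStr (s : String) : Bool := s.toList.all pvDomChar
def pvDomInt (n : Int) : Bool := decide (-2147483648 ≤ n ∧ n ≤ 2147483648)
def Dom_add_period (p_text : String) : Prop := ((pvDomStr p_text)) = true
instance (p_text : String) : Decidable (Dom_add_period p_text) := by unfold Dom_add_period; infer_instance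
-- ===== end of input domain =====

-- B rebuilds the text from its '"'-separated segments (simpler decomposition); A scans char by char with a parity counter.

-- ===== PORT A =====
-- A's loop: scan each character, toggling quote_count between 0 and 1, appending to an output accumulator.
def add_period (p_text : String) : String :=
  String.mk ((p_text.toList.foldl
    (fun (st : Nat × List Char) c =>
      if c ≠ '"' then (st.1, st.2 ++ [c])
      else if st.1 = 0 then (st.1 + 1, st.2 ++ [c])
      else (0, st.2 ++ ['.', c]))
    (0, ([] : List Char))).2)

-- ===== PORT B =====
-- hand port of Python's str.split for a single-character separator (exact for sep = '"')
def pvSplitQuote : List Char → List (List Char)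
  | [] => [[]]
  | c :: cs =>
    if c = '"' then [] :: pvSplitQuote cs
    else
      match pvSplitQuote cs with
      | s :: rest => (c :: s) :: rest
      | [] => [[c]]  -- unreachable: pvSplitQuote never returns []

def add_period_alt (p_text : String) : String :=
  match pvSplitQuote p_text.toList with
  | [] => ""  -- unreachable
  | s0 :: rest =>
    String.mk (s0 ++ (rest.foldl
      (fun (st : Nat × List Char) seg =>
        (st.1 + 1, st.2 ++ (if st.1 % 2 = 0 then ['.'] else []) ++ '"' :: seg))
      (1, ([] : List Char))).2)

-- ===== PRECONDITION & SPEC =====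
def Spec_add_period (p_text : String) (out : String) : Prop := out = add_period_alt p_text
instance (p_text : String) (out : String) : Decidable (Spec_add_period p_text out) := by unfold Spec_add_period; infer_instance

-- ===== CLAIM (what is proved, stated in full; the proofs are below) =====
def Claim_equal_add_period : Prop := ∀ (p_text : String), Dom_add_period p_text → Spec_add_period p_text (add_period p_text)

-- ===== LEMMAS AND PROOFS =====

-- recursion capturing A's loop body (output suffix produced from state q)
def pvGA : List Char → Nat → List Char
  | [], _ => []
  | c :: cs, q =>
    if c ≠ '"' then c :: pvGA cs q
    else if q = 0 then c :: pvGA cs (q + 1)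
    else '.' :: c :: pvGA cs 0

-- recursion capturing B's joining loop
def pvHB : List (List Char) → Nat → List Char
  | [], _ => []
  | seg :: rest, k => (if k % 2 = 0 then ['.'] else []) ++ '"' :: seg ++ pvHB rest (k + 1)

theorem pvFoldA (cs : List Char) : ∀ (q : Nat) (acc : List Char),
    (cs.foldl
      (fun (st : Nat × List Char) c =>
        if c ≠ '"' then (st.1, st.2 ++ [c])
        else if st.1 = 0 then (st.1 + 1, st.2 ++ [c])
        else (0, st.2 ++ ['.', c]))
      (q, acc)).2 = acc ++ pvGA cs q := by
  induction cs with
  | nil => intro q acc; simp [pvGA]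
  | cons c cs ih =>
    intro q acc
    simp only [List.foldl_cons, pvGA]
    split_ifs with h1 h2 <;> (rw [ih]; simp)

theorem pvFoldB (segs : List (List Char)) : ∀ (k : Nat) (acc : List Char),
    (segs.foldl
      (fun (st : Nat × List Char) seg =>
        (st.1 + 1, st.2 ++ (if st.1 % 2 = 0 then ['.'] else []) ++ '"' :: seg))
      (k, acc)).2 = acc ++ pvHB segs k := by
  induction segs with
  | nil => intro k acc; simp [pvHB]
  | cons seg rest ih =>
    intro k acc
    simp only [List.foldl_cons, pvHB]
    rw [ih]
    simp

theorem pvSplitQuote_ne_nil (cs : List Char) : pvSplitQuote cs ≠ [] := by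
  cases cs with
  | nil => simp [pvSplitQuote]
  | cons c cs =>
    simp only [pvSplitQuote]
    split_ifs
    · simp
    · cases h : pvSplitQuote cs <;> simp

theorem pvMain (cs : List Char) : ∀ (k : Nat),
    pvGA cs (if k % 2 = 0 then 1 else 0) =
      (pvSplitQuote cs).headD [] ++ pvHB (pvSplitQuote cs).tail k := by
  induction cs with
  | nil => intro k; simp [pvGA, pvSplitQuote, pvHB]
  | cons c cs ih =>
    intro k
    by_cases hc : c = '"'
    · subst hc
      simp only [pvSplitQuote, List.headD, List.tail]
      obtain ⟨s0, rest, hsr⟩ : ∃ s0 rest, pvSplitQuote cs = s0 :: rest := by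
        cases h : pvSplitQuote cs with
        | nil => exact absurd h (pvSplitQuote_ne_nil cs)
        | cons a b => exact ⟨a, b, rfl⟩
      rw [hsr]
      simp only [pvGA]
      have ihk := ih (k + 1)
      rw [hsr] at ihk
      simp only [List.headD, List.tail] at ihk
      rcases Nat.even_or_odd k with hk | hk
      · have hk0 : k % 2 = 0 := Nat.even_iff.mp hk
        have hk1 : (k + 1) % 2 = 1 := by omega
        rw [hk1] at ihk
        norm_num at ihk
        simp [pvHB, hk0, ihk]
      · have hk0 : k % 2 = 1 := Nat.odd_iff.mp hk
        have hk1 : (k + 1) % 2 = 0 := by omega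
        rw [hk1] at ihk
        norm_num at ihk
        simp [pvHB, hk0, ihk]
    · have hsplit : pvSplitQuote (c :: cs) =
        match pvSplitQuote cs with
        | s :: rest => (c :: s) :: rest
        | [] => [[c]] := by simp [pvSplitQuote, hc]
      obtain ⟨s0, rest, hsr⟩ : ∃ s0 rest, pvSplitQuote cs = s0 :: rest := by
        cases h : pvSplitQuote cs with
        | nil => exact absurd h (pvSplitQuote_ne_nil cs)
        | cons a b => exact ⟨a, b, rfl⟩
      rw [hsr] at hsplit
      simp only [pvGA, if_pos hc, hsplit, List.headD, List.tail]
      have ihk := ih k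
      rw [hsr] at ihk
      simp only [List.headD, List.tail] at ihk
      simp [ihk]

-- ===== VERDICT (by name: the statement is the Claim_ definition above) =====
theorem add_period_spec : Claim_equal_add_period := by
  intro p _
  unfold Spec_add_period add_period add_period_alt
  rw [pvFoldA]
  obtain ⟨s0, rest, hsr⟩ : ∃ s0 rest, pvSplitQuote p.toList = s0 :: rest := by
    cases h : pvSplitQuote p.toList with
    | nil => exact absurd h (pvSplitQuote_ne_nil p.toList)
    | cons a b => exact ⟨a, b, rfl⟩
  rw [hsr]
  dsimp only
  rw [pvFoldB]
  have h := pvMain p.toList 1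
  rw [hsr] at h
  simp only [List.headD, List.tail] at h
  norm_num at h
  simp [h]
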